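-- pv_equiv track=rewrite | github.com/jeonlego012/coding | price.py | solution
-- ===== SOURCE A (Python) =====
-- def solution(prices) :
--     increasingPeriod = [0 for i in range(len(prices))]
--     for i in range(len(prices)-1) :
--         for j in range(i, len(prices)-1) :
--             if prices[i] <= prices[j] :
--                 increasingPeriod[i] += 1
--             else :
--                 break
--
--     return increasingPeriod
-- ===== SOURCE B (Python) =====
-- def solution(prices):
--     # Monotonic stack: find each index's first strictly smaller price to the right
--     # in one pass; answer is the index difference (capped at the last day).
--     n = len(prices)
--     ans = [0] * n
--     stack = []
--     for i in range(n):
--         while stack and prices[stack[-1]] > prices[i]: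
--             j = stack.pop()
--             ans[j] = i - j
--         stack.append(i)
--     while stack:
--         j = stack.pop()
--         ans[j] = n - 1 - j
--     return ans
-- ===== Notes on version B (the rewrite author's own statement) =====
-- stated objective: faster
-- what changed: Replaced the per-index rescan-until-smaller inner loop with a single-pass monotonic stack that assigns each index its count when its first strictly smaller price appears (or at the end).
import Mathlib
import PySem

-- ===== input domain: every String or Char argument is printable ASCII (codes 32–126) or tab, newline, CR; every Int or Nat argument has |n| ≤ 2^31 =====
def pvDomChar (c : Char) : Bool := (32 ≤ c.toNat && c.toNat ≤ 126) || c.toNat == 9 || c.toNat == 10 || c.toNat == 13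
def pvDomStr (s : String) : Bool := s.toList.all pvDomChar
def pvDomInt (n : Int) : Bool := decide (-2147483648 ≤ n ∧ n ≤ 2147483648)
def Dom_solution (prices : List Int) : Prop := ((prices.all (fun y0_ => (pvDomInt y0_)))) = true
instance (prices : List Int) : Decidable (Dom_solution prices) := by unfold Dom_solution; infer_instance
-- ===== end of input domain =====

-- B replaces A's quadratic rescan-until-smaller inner loop with a one-pass monotonic
-- stack (objective: faster, asymptotic).

-- ===== PORT A =====
-- Inner loop 'for j in range(i, len(prices)-1): if prices[i] <= prices[j]: acc += 1 else: break';
-- the break is the recursion's stop.  All indices are provably in range, so getD is exact.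
def solutionInner (prices : List Int) (pi : Int) (acc : Int) : List Nat → Int
  | [] => acc
  | j :: rest =>
    if pi ≤ prices.getD j 0 then solutionInner prices pi (acc + 1) rest else acc

def solution (prices : List Int) : List Int :=
  let n := prices.length
  (List.range (n - 1)).foldl
    (fun inc i =>
      inc.set i (solutionInner prices (prices.getD i 0) (inc.getD i 0) (List.range' i (n - 1 - i))))
    (List.replicate n 0)

-- ===== PORT B =====
-- 'while stack and prices[stack[-1]] > prices[i]: j = stack.pop(); ans[j] = i - j'
def solutionAltPop (prices : List Int) (i : Nat) : List Int → List Nat → List Int × List Nat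
  | ans, [] => (ans, [])
  | ans, j :: rest =>
    if prices.getD i 0 < prices.getD j 0 then
      solutionAltPop prices i (ans.set j ((i : Int) - (j : Int))) rest
    else (ans, j :: rest)

-- 'while stack: j = stack.pop(); ans[j] = n - 1 - j'
def solutionAltFinal (n : Nat) : List Int → List Nat → List Int
  | ans, [] => ans
  | ans, j :: rest => solutionAltFinal n (ans.set j ((n : Int) - 1 - (j : Int))) rest

def solution_alt (prices : List Int) : List Int :=
  let n := prices.length
  let st := (List.range n).foldl
    (fun st i =>
      let st' := solutionAltPop prices i st.1 st.2
      (st'.1, i :: st'.2))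
    (List.replicate n 0, [])
  solutionAltFinal n st.1 st.2

-- ===== PRECONDITION & SPEC =====
def Spec_solution (prices : List Int) (out : List Int) : Prop := out = solution_alt prices
instance (prices : List Int) (out : List Int) : Decidable (Spec_solution prices out) := by unfold Spec_solution; infer_instance

-- ===== CLAIM (what is proved, stated in full; the proofs are below) =====
def Claim_equal_solution : Prop := ∀ (prices : List Int), Dom_solution prices → Spec_solution prices (solution prices)

-- ===== LEMMAS AND PROOFS =====

lemma getD_set_self' (l : List Int) (i : Nat) (v : Int) (h : i < l.length) :
    (l.set i v).getD i 0 = v := by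
  simp [List.getD_eq_getElem?_getD, h]

lemma getD_set_ne' (l : List Int) (i j : Nat) (v : Int) (h : j ≠ i) :
    (l.set i v).getD j 0 = l.getD j 0 := by
  simp [List.getD_eq_getElem?_getD, (Ne.symm h : i ≠ j)]

/-- `prices[k]` for an in-range Nat index. -/
def gD (prices : List Int) (k : Nat) : Int := prices.getD k 0

/-- No strictly smaller price strictly between `j` and `i`. -/
def okUpTo (prices : List Int) (j i : Nat) : Prop :=
  ∀ k, j < k → k < i → gD prices j ≤ gD prices k

/-- The value A computes at index `j` (count of steps before the first smaller price,
capped at the last index). -/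
def target (prices : List Int) (j : Nat) : Int :=
  (((List.range' j (prices.length - 1 - j)).takeWhile
      (fun k => gD prices j ≤ gD prices k)).length : Int)

lemma okUpTo_mono {prices : List Int} {j i i' : Nat} (h : okUpTo prices j i') (hle : i ≤ i') :
    okUpTo prices j i := fun k hk hk' => h k hk (lt_of_lt_of_le hk' hle)

lemma takeWhile_range'_len (p : Nat → Bool) (b : Nat) :
    ∀ (m a : Nat), a ≤ b → b ≤ a + m →
    (∀ k, a ≤ k → k < b → p k) → (b < a + m → p b = false) →
    ((List.range' a m).takeWhile p).length = b - a := by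
  intro m
  induction m with
  | zero => intro a hab hba _ _; simp; omega
  | succ m ih =>
    intro a hab hba hall hb
    rw [List.range'_succ] -- range' a (m+1) = a :: range' (a+1) m
    by_cases hba' : a = b
    · subst hba'
      have : p a = false := hb (by omega)
      simp [List.takeWhile, this]
    · have ha : p a = true := hall a le_rfl (by omega)
      simp only [List.takeWhile, ha, List.length_cons]
      rw [ih (a + 1) (by omega) (by omega) (fun k hk hk' => hall k (by omega) hk') (fun h => hb (by omega))]
      omega

lemma target_of_stop {prices : List Int} {j i : Nat} (hji : j < i) (hin : i < prices.length)
    (hok : okUpTo prices j i) (hlt : gD prices i < gD prices j) :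
    target prices j = (i : Int) - (j : Int) := by
  unfold target
  rw [takeWhile_range'_len _ i (prices.length - 1 - j) j (by omega) (by omega)
      (fun k hk hk' => by
        simp only [decide_eq_true_eq]
        rcases Nat.eq_or_lt_of_le hk with h | h
        · subst h; exact le_rfl
        · exact hok k h hk')
      (fun h => by simp only [decide_eq_false_iff_not, not_le]; exact hlt)]
  omega

lemma target_of_end {prices : List Int} {j : Nat} (hj : j < prices.length)
    (hok : okUpTo prices j prices.length) :
    target prices j = (prices.length : Int) - 1 - (j : Int) := by
  unfold target
  rw [takeWhile_range'_len _ (prices.length - 1) (prices.length - 1 - j) j (by omega) (by omega)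
      (fun k hk hk' => by
        simp only [decide_eq_true_eq]
        rcases Nat.eq_or_lt_of_le hk with h | h
        · subst h; exact le_rfl
        · exact hok k h (by omega))
      (fun h => by omega)]
  omega

lemma solutionInner_eq (prices : List Int) (p : Int) :
    ∀ (L : List Nat) (acc : Int),
    solutionInner prices p acc L = acc + ((L.takeWhile (fun j => p ≤ prices.getD j 0)).length : Int) := by
  intro L
  induction L with
  | nil => intro acc; simp [solutionInner]
  | cons j rest ih =>
    intro acc
    by_cases h : p ≤ prices.getD j 0
    · have h' : p ≤ prices[j]?.getD 0 := by rwa [List.getD_eq_getElem?_getD] at h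
      rw [show solutionInner prices p acc (j :: rest)
            = solutionInner prices p (acc + 1) rest from by simp [solutionInner, h'], ih,
        List.takeWhile_cons, if_pos (by simpa [List.getD_eq_getElem?_getD] using h)]
      simp only [List.length_cons]
      push_cast; ring
    · have h' : ¬ p ≤ prices[j]?.getD 0 := by rwa [List.getD_eq_getElem?_getD] at h
      rw [show solutionInner prices p acc (j :: rest) = acc from by simp [solutionInner, h'],
        List.takeWhile_cons, if_neg (by simpa [List.getD_eq_getElem?_getD] using h)]
      simp

-- ---- A's fold computes `target` at each position ----

lemma solutionA_fold (prices : List Int) :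
    ∀ m, m ≤ prices.length - 1 →
    ((List.range m).foldl
      (fun inc i =>
        inc.set i (solutionInner prices (prices.getD i 0) (inc.getD i 0)
          (List.range' i (prices.length - 1 - i))))
      (List.replicate prices.length 0)).length = prices.length ∧
    ∀ j, ((List.range m).foldl
      (fun inc i =>
        inc.set i (solutionInner prices (prices.getD i 0) (inc.getD i 0)
          (List.range' i (prices.length - 1 - i))))
      (List.replicate prices.length 0)).getD j 0 = if j < m then target prices j else 0 := by
  intro m
  induction m with
  | zero => intro _; simp
  | succ m ih =>
    intro hm
    obtain ⟨hlen, hval⟩ := ih (by omega)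
    rw [List.range_succ, List.foldl_append]
    simp only [List.foldl_cons, List.foldl_nil]
    constructor
    · simpa using hlen
    · intro j
      have hm0 := hval m
      rw [if_neg (by omega)] at hm0
      rw [hm0]
      by_cases hj : j = m
      · subst hj
        rw [getD_set_self' _ _ _ (by rw [hlen]; omega), if_pos (by omega)]
        rw [solutionInner_eq]
        unfold target gD
        simp
      · rw [getD_set_ne' _ _ _ _ hj, hval j]
        by_cases h1 : j < m
        · rw [if_pos h1, if_pos (by omega)]
        · rw [if_neg h1, if_neg (by omega)]

lemma solutionA_char (prices : List Int) :
    (solution prices).length = prices.length ∧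
    ∀ j, (solution prices).getD j 0 = if j < prices.length - 1 then target prices j else 0 := by
  unfold solution
  exact solutionA_fold prices (prices.length - 1) le_rfl

-- ---- B's stack invariant ----

def StackInv (prices : List Int) (i : Nat) (ans : List Int) (stk : List Nat) : Prop :=
  ans.length = prices.length ∧
  List.Pairwise (fun a b => b < a ∧ gD prices b ≤ gD prices a) stk ∧
  (∀ j ∈ stk, j < i ∧ okUpTo prices j i) ∧
  (∀ j, j < i → okUpTo prices j i → j ∈ stk) ∧
  (∀ j, j < prices.length → j ∉ stk → j < i → ans.getD j 0 = target prices j)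

lemma pop_spec (prices : List Int) (i : Nat) (hin : i < prices.length) :
    ∀ (stk : List Nat) (ans : List Int),
    ans.length = prices.length →
    List.Pairwise (fun a b => b < a ∧ gD prices b ≤ gD prices a) stk →
    (∀ j ∈ stk, j < i ∧ okUpTo prices j i) →
    (∀ j, j < prices.length → j ∉ stk → j < i → ans.getD j 0 = target prices j) →
    (solutionAltPop prices i ans stk).2 <:+ stk ∧
    (solutionAltPop prices i ans stk).1.length = prices.length ∧
    (∀ j ∈ (solutionAltPop prices i ans stk).2, gD prices j ≤ gD prices i) ∧
    (∀ j ∈ stk, j ∉ (solutionAltPop prices i ans stk).2 → gD prices i < gD prices j) ∧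
    (∀ j, j < prices.length → j ∉ (solutionAltPop prices i ans stk).2 → j < i →
      (solutionAltPop prices i ans stk).1.getD j 0 = target prices j) := by
  intro stk
  induction stk with
  | nil =>
    intro ans hlen _ _ hans
    simp only [solutionAltPop]
    exact ⟨List.nil_suffix, hlen, by simp, by simp, hans⟩
  | cons j0 rest ih =>
    intro ans hlen hpw hmem hans
    by_cases hc : prices.getD i 0 < prices.getD j0 0
    · -- pop j0
      have hj0 := hmem j0 (by simp)
      have hj0lt : j0 < i := hj0.1
      have htgt : target prices j0 = (i : Int) - (j0 : Int) :=
        target_of_stop hj0lt hin hj0.2 hc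
      have hans' : ∀ j, j < prices.length → j ∉ rest → j < i →
          (ans.set j0 ((i : Int) - (j0 : Int))).getD j 0 = target prices j := by
        intro j hj hjr hji
        by_cases hjj : j = j0
        · subst hjj
          rw [getD_set_self' _ _ _ (by rw [hlen]; omega)]
          exact htgt.symm
        · rw [getD_set_ne' _ _ _ _ hjj]
          exact hans j hj (by simp [hjj, hjr]) hji
      obtain ⟨hsfx, hlen', hle, hpop, hans''⟩ :=
        ih (ans.set j0 ((i : Int) - (j0 : Int))) (by simp [hlen])
          (List.Pairwise.sublist (List.sublist_cons_self j0 rest) hpw)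
          (fun j hj => hmem j (by simp [hj])) hans'
      have heq : solutionAltPop prices i ans (j0 :: rest) =
          solutionAltPop prices i (ans.set j0 ((i : Int) - (j0 : Int))) rest := by
        simp only [solutionAltPop]; rw [if_pos hc]
      rw [heq]
      refine ⟨hsfx.trans (List.suffix_cons j0 rest), hlen', hle, ?_, hans''⟩
      intro j hj hj'
      rcases List.mem_cons.mp hj with h | h
      · subst h; exact hc
      · exact hpop j h hj'
    · -- stop
      have heq : solutionAltPop prices i ans (j0 :: rest) = (ans, j0 :: rest) := by
        simp only [solutionAltPop]; rw [if_neg hc]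
      rw [heq]
      refine ⟨List.suffix_refl _, hlen, ?_, ?_, hans⟩
      · intro j hj
        rcases List.mem_cons.mp hj with h | h
        · subst h; exact not_lt.mp hc
        · have := (List.pairwise_cons.mp hpw).1 j h
          exact le_trans this.2 (not_lt.mp hc)
      · intro j hj hj'; exact absurd hj hj'

lemma step_inv (prices : List Int) (i : Nat) (ans : List Int) (stk : List Nat)
    (hin : i < prices.length) (h : StackInv prices i ans stk) :
    StackInv prices (i + 1) (solutionAltPop prices i ans stk).1
      (i :: (solutionAltPop prices i ans stk).2) := by
  obtain ⟨hlen, hpw, hmem, hcomp, hans⟩ := h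
  obtain ⟨hsfx, hlen', hle, hpop, hans'⟩ := pop_spec prices i hin stk ans hlen hpw hmem hans
  refine ⟨hlen', ?_, ?_, ?_, ?_⟩
  · rw [List.pairwise_cons]
    refine ⟨fun j hj => ⟨(hmem j (hsfx.subset hj)).1, hle j hj⟩, hpw.sublist hsfx.sublist⟩
  · intro j hj
    rcases List.mem_cons.mp hj with h | h
    · subst h
      exact ⟨by omega, fun k hk hk' => absurd hk' (by omega)⟩
    · have hm := hmem j (hsfx.subset h)
      refine ⟨by omega, fun k hk hk' => ?_⟩
      by_cases hki : k = i
      · subst hki; exact hle j h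
      · exact hm.2 k hk (by omega)
  · intro j hj hok
    by_cases hji : j = i
    · subst hji; exact List.mem_cons_self
    · have hji' : j < i := by omega
      have hjstk : j ∈ stk := hcomp j hji' (okUpTo_mono hok (by omega))
      rcases Decidable.em (j ∈ (solutionAltPop prices i ans stk).2) with h | h
      · exact List.mem_cons_of_mem _ h
      · exact absurd (hok i hji' (by omega)) (not_le.mpr (hpop j hjstk h))
  · intro j hj hjn hji
    have hji' : j < i := by
      rcases Nat.lt_succ_iff_lt_or_eq.mp hji with h | h
      · exact h
      · exact absurd (h ▸ List.mem_cons_self) hjn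
    exact hans' j hj (fun h => hjn (List.mem_cons_of_mem _ h)) hji'

lemma fold_inv (prices : List Int) :
    ∀ m, m ≤ prices.length →
    StackInv prices m
      ((List.range m).foldl
        (fun st i => let st' := solutionAltPop prices i st.1 st.2; (st'.1, i :: st'.2))
        (List.replicate prices.length 0, [])).1
      ((List.range m).foldl
        (fun st i => let st' := solutionAltPop prices i st.1 st.2; (st'.1, i :: st'.2))
        (List.replicate prices.length 0, [])).2 := by
  intro m
  induction m with
  | zero =>
    intro _
    refine ⟨by simp, by simp, by simp, fun j hj _ => absurd hj (by omega), fun j _ _ hj => absurd hj (by omega)⟩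
  | succ m ih =>
    intro hm
    rw [List.range_succ, List.foldl_append]
    simp only [List.foldl_cons, List.foldl_nil]
    exact step_inv prices m _ _ (by omega) (ih (by omega))

lemma final_spec (prices : List Int) :
    ∀ (stk : List Nat) (ans : List Int),
    ans.length = prices.length →
    (∀ j ∈ stk, j < prices.length ∧ okUpTo prices j prices.length) →
    (∀ j, j < prices.length → j ∉ stk → ans.getD j 0 = target prices j) →
    (solutionAltFinal prices.length ans stk).length = prices.length ∧
    (∀ j, j < prices.length → (solutionAltFinal prices.length ans stk).getD j 0 = target prices j) := by
  intro stk
  induction stk with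
  | nil => intro ans hlen _ hans; exact ⟨hlen, fun j hj => hans j hj (by simp)⟩
  | cons j0 rest ih =>
    intro ans hlen hmem hans
    have hj0 := hmem j0 (by simp)
    have htgt : target prices j0 = (prices.length : Int) - 1 - (j0 : Int) :=
      target_of_end hj0.1 hj0.2
    simp only [solutionAltFinal]
    apply ih
    · simp [hlen]
    · exact fun j hj => hmem j (by simp [hj])
    · intro j hj hjr
      by_cases hjj : j = j0
      · subst hjj
        rw [getD_set_self' _ _ _ (by rw [hlen]; exact hj0.1)]
        exact htgt.symm
      · rw [getD_set_ne' _ _ _ _ hjj]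
        exact hans j hj (by simp [hjj, hjr])

lemma solutionB_char (prices : List Int) :
    (solution_alt prices).length = prices.length ∧
    ∀ j, j < prices.length → (solution_alt prices).getD j 0 = target prices j := by
  unfold solution_alt
  obtain ⟨hlen, hpw, hmem, _, hans⟩ := fold_inv prices prices.length le_rfl
  apply final_spec prices _ _ hlen
  · exact fun j hj => hmem j hj
  · intro j hj hjn
    by_cases hji : j < prices.length
    · exact hans j hj hjn hji
    · omega

lemma target_last (prices : List Int) :
    target prices (prices.length - 1) = 0 := by
  unfold target
  simp

-- ===== VERDICT (by name: the statement is the Claim_ definition above) =====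
theorem solution_spec : Claim_equal_solution := by
  intro prices _
  unfold Spec_solution
  obtain ⟨hAl, hAv⟩ := solutionA_char prices
  obtain ⟨hBl, hBv⟩ := solutionB_char prices
  apply List.ext_getElem (by omega)
  intro j hj hj'
  have h1 : (solution prices).getD j 0 = (solution prices)[j] := by
    rw [List.getD_eq_getElem?_getD, List.getElem?_eq_getElem hj]; rfl
  have h2 : (solution_alt prices).getD j 0 = (solution_alt prices)[j] := by
    rw [List.getD_eq_getElem?_getD, List.getElem?_eq_getElem hj']; rfl
  rw [← h1, ← h2, hAv j, hBv j (by omega)]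
  by_cases h : j < prices.length - 1
  · rw [if_pos h]
  · rw [if_neg h]
    have : j = prices.length - 1 := by omega
    rw [this, target_last]
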